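-- pv_equiv track=rewrite | github.com/tkwang0530/LeetCode | 2567.py | minimizeSum2
-- ===== SOURCE A (Python) =====
-- from typing import List
-- import heapq
--
-- def minimizeSum2(nums: List[int]) -> int:
--     threshold = 3
--     minHeap = []  # for finding the max three numbers
--     maxHeap = []  # for finding the min three numbers
--     for num in nums:
--         if len(minHeap) == threshold:
--             heapq.heappushpop(minHeap, num)
--             heapq.heappushpop(maxHeap, -num)
--         else:
--             heapq.heappush(minHeap, num)
--             heapq.heappush(maxHeap, -num)
--
--     minHeap.sort()
--     maxHeap = sorted([-num for num in maxHeap])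
--
--     return min(
--         minHeap[-1]-maxHeap[-1],  # remove two smallest numbers
--         minHeap[0]-maxHeap[0],  # remove two largest numbers
--         minHeap[1]-maxHeap[1],  # remove largest and smallest numbers
--     )
-- ===== SOURCE B (Python) =====
-- def minimizeSum2(nums):
--     s = sorted(nums)
--     top = s[-3:]  # the up-to-3 largest, ascending
--     bot = s[:3]   # the up-to-3 smallest, ascending
--     return min(top[-1] - bot[-1], top[0] - bot[0], top[1] - bot[1])
-- ===== Notes on version B (the rewrite author's own statement) =====
-- stated objective: simpler
-- what changed: Replaces the incremental two-heap (heappush/heappushpop) maintenance of the 3 largest and 3 smallest elements with one full sort followed by the slices s[-3:] and s[:3].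
import Mathlib
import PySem

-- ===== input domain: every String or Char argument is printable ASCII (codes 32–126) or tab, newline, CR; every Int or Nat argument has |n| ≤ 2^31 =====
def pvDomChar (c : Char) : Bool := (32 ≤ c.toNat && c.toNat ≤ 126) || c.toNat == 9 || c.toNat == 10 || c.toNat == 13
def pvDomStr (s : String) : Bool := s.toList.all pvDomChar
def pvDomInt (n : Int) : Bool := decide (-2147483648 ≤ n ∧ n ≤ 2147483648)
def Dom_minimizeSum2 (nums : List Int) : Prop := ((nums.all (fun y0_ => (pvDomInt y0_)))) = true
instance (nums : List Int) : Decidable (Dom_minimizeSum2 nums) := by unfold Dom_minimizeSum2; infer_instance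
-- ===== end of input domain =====

-- B replaces A's incremental two-heap maintenance of the 3 largest / 3 smallest elements
-- by one full sort and the slices s[-3:] and s[:3] (objective: simpler; not claimed faster).


-- ===== PORT A =====
-- heapq heaps are modelled by the list of their CONTENTS (heappush = append,
-- heappushpop = append then remove one occurrence of the minimum).  This is exact here:
-- the internal array layout of a Python heap is unobservable in A, which only sorts the
-- final contents — heappushpop(h, v) leaves h holding (contents + v) minus one minimum.
def pvPushpop (h : List Int) (x : Int) : List Int :=
  let h' := h ++ [x]
  match PySem.List.min? h' (fun y => y) with
  | none => h'
  | some m => (PySem.List.remove? h' m).getD h'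

def minimizeSum2 (nums : List Int) : Int :=
  let st := nums.foldl (fun (st : List Int × List Int) num =>
    if st.1.length == 3 then
      (pvPushpop st.1 num, pvPushpop st.2 (-num))
    else
      (st.1 ++ [num], st.2 ++ [-num])) ([], [])
  let minH := PySem.List.sorted st.1 (fun y => y) false
  let maxH := PySem.List.sorted (st.2.map (fun y => -y)) (fun y => y) false
  min (PySem.List.pyGetD minH (-1) 0 - PySem.List.pyGetD maxH (-1) 0)
    (min (PySem.List.pyGetD minH 0 0 - PySem.List.pyGetD maxH 0 0)
      (PySem.List.pyGetD minH 1 0 - PySem.List.pyGetD maxH 1 0))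

-- ===== PORT B =====
def minimizeSum2_alt (nums : List Int) : Int :=
  let s := PySem.List.sorted nums (fun y => y) false
  let top := PySem.List.slice s (some (-3)) none
  let bot := PySem.List.slice s none (some 3)
  min (PySem.List.pyGetD top (-1) 0 - PySem.List.pyGetD bot (-1) 0)
    (min (PySem.List.pyGetD top 0 0 - PySem.List.pyGetD bot 0 0)
      (PySem.List.pyGetD top 1 0 - PySem.List.pyGetD bot 1 0))

-- ===== PRECONDITION & SPEC =====
-- Python A raises IndexError when len(nums) < 2 (minHeap[1], or minHeap[-1] on []); Pre_ excludes exactly those inputs.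
def Pre_minimizeSum2 (nums : List Int) : Prop := 2 ≤ nums.length
instance (nums : List Int) : Decidable (Pre_minimizeSum2 nums) := by unfold Pre_minimizeSum2; infer_instance
def pvWitness_minimizeSum2 : List Int := [3, 1, 4, 1, 5]

def Spec_minimizeSum2 (nums : List Int) (out : Int) : Prop := out = minimizeSum2_alt nums
instance (nums : List Int) (out : Int) : Decidable (Spec_minimizeSum2 nums out) := by unfold Spec_minimizeSum2; infer_instance

-- ===== CLAIM (what is proved, stated in full; the proofs are below) =====
def Claim_equal_minimizeSum2 : Prop := ∀ (nums : List Int), Dom_minimizeSum2 nums → Pre_minimizeSum2 nums → Spec_minimizeSum2 nums (minimizeSum2 nums)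

-- ===== LEMMAS AND PROOFS =====

-- the per-element heap update of A, on a single heap
def pvStep (h : List Int) (x : Int) : List Int :=
  if h.length == 3 then pvPushpop h x else h ++ [x]

-- Python sorted with the identity key
def pvSort (l : List Int) : List Int := PySem.List.sorted l (fun y => y) false

-- the last min(3, n) elements of a list
def pvLast3 (l : List Int) : List Int := l.drop (l.length - 3)

theorem pvSort_pairwise (l : List Int) : (pvSort l).Pairwise (· ≤ ·) := by
  simpa [pvSort] using PySem.List.sorted_pairwise l (fun y : Int => y)

theorem pvPushpop_eq_erase (h : List Int) (x : Int) :
    ∃ m, PySem.List.min? (h ++ [x]) (fun y => y) = some m ∧ m ∈ h ++ [x] ∧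
      (∀ y ∈ h ++ [x], m ≤ y) ∧ pvPushpop h x = (h ++ [x]).erase m := by
  cases hmin : PySem.List.min? (h ++ [x]) (fun y => y) with
  | none => exact absurd ((PySem.List.min?_eq_none_iff _ _).mp hmin) (by simp)
  | some m =>
    have hm : m ∈ h ++ [x] := PySem.List.min?_mem hmin
    refine ⟨m, rfl, hm, fun y hy => PySem.List.min?_isMin hmin y hy, ?_⟩
    simp [pvPushpop, hmin, PySem.List.remove?_eq_some_erase _ m hm]

theorem pvPushpop_length (h : List Int) (x : Int) :
    (pvPushpop h x).length = h.length := by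
  obtain ⟨m, _, hm, _, he⟩ := pvPushpop_eq_erase h x
  rw [he, List.length_erase_of_mem hm]; simp

theorem pvPushpop_perm (h : List Int) (x a b c : Int) (hab : a ≤ b) (hac : a ≤ c)
    (hp : h.Perm [a, b, c]) :
    (pvPushpop h x).Perm (if x ≤ a then [a, b, c] else [b, c, x]) := by
  obtain ⟨m, _, hm, hmin, he⟩ := pvPushpop_eq_erase h x
  have hp' : (h ++ [x]).Perm [a, b, c, x] := by simpa using hp.append_right [x]
  have hmem : m = a ∨ m = b ∨ m = c ∨ m = x := by
    have := hp'.mem_iff.mp hm; simpa using this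
  have hma : m ≤ a := hmin a (hp'.mem_iff.mpr (by simp))
  have hmx : m ≤ x := hmin x (by simp)
  rw [he]
  have herase : ((h ++ [x]).erase m).Perm ([a, b, c, x].erase m) := hp'.erase m
  by_cases hxa : x ≤ a
  · have hmeq : m = x := le_antisymm hmx (by rcases hmem with rfl|rfl|rfl|rfl <;> omega)
    rw [if_pos hxa]
    subst hmeq
    by_cases hax : a = m
    · subst hax
      refine herase.trans ?_
      simp only [List.erase_cons_head]
      simpa using List.perm_append_singleton a [b, c]
    · have hb : b ≠ m := fun hbm => hax (le_antisymm (hbm ▸ hab) hma)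
      have hc : c ≠ m := fun hcm => hax (le_antisymm (hcm ▸ hac) hma)
      refine herase.trans ?_
      simp [hax, hb, hc]
  · have hmeq : m = a := le_antisymm hma (by rcases hmem with rfl|rfl|rfl|rfl <;> omega)
    rw [if_neg hxa]
    subst hmeq
    simpa using herase

theorem pvIns_skip (x : Int) (u v : List Int) (hu : ∀ y ∈ u, ¬ x ≤ y) :
    List.orderedInsert (· ≤ ·) x (u ++ v) = u ++ List.orderedInsert (· ≤ ·) x v := by
  induction u with
  | nil => rfl
  | cons y u ih =>
    simp only [List.cons_append, List.orderedInsert]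
    rw [if_neg (hu y (by simp)), ih (fun z hz => hu z (by simp [hz]))]

theorem pvIns_split (x a : Int) (hx : x ≤ a) (u v : List Int) :
    ∃ w : List Int, List.orderedInsert (· ≤ ·) x (u ++ a :: v) = w ++ a :: v ∧ w.length = u.length + 1 := by
  induction u with
  | nil => exact ⟨[x], by simp [hx], by simp⟩
  | cons y u ih =>
    by_cases h : x ≤ y
    · exact ⟨x :: y :: u, by simp [h], by simp⟩
    · obtain ⟨w, hw, hlen⟩ := ih
      exact ⟨y :: w, by simp [h, hw], by simp [hlen]⟩

theorem pvSort_append_singleton (l : List Int) (x : Int) :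
    pvSort (l ++ [x]) = List.orderedInsert (· ≤ ·) x (pvSort l) := by
  have h1 : (List.orderedInsert (· ≤ ·) x (pvSort l)).Perm (x :: pvSort l) :=
    List.perm_orderedInsert _ x _
  have h2 : (x :: pvSort l).Perm (x :: l) := (PySem.List.sorted_perm l _ _).cons x
  have h3 : (x :: l).Perm (l ++ [x]) := (List.perm_append_singleton x l).symm
  have hpw : (List.orderedInsert (· ≤ ·) x (pvSort l)).Pairwise (· ≤ ·) :=
    List.Pairwise.orderedInsert x (pvSort l) (pvSort_pairwise l)
  exact PySem.List.sorted_id_eq_of_perm_of_pairwise _ _ ((h1.trans h2).trans h3) hpw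

theorem pvPairFold (nums : List Int) (h1 h2 : List Int) (hlen : h1.length = h2.length) :
    nums.foldl (fun (st : List Int × List Int) num =>
      if st.1.length == 3 then
        (pvPushpop st.1 num, pvPushpop st.2 (-num))
      else
        (st.1 ++ [num], st.2 ++ [-num])) (h1, h2)
    = (nums.foldl pvStep h1, (nums.map (fun y => -y)).foldl pvStep h2) := by
  induction nums generalizing h1 h2 with
  | nil => rfl
  | cons x t ih =>
    simp only [List.foldl_cons, List.map_cons]
    by_cases h3 : h1.length = 3
    · have h3' : h2.length = 3 := hlen ▸ h3
      rw [if_pos (by simpa using h3)]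
      have := ih (pvPushpop h1 x) (pvPushpop h2 (-x))
        (by rw [pvPushpop_length, pvPushpop_length, hlen])
      simp only [pvStep, h3, h3', beq_self_eq_true, if_pos] at this ⊢
      simpa using this
    · have h3' : ¬ h2.length = 3 := hlen ▸ h3
      rw [if_neg (by simpa using h3)]
      have := ih (h1 ++ [x]) (h2 ++ [-x]) (by simp [hlen])
      simp only [pvStep] at this ⊢
      rw [if_neg (by simpa using h3), if_neg (by simpa using h3')]
      exact this

theorem pvHeapInv (l : List Int) : (l.foldl pvStep []).Perm (pvLast3 (pvSort l)) := by
  induction l using List.reverseRecOn with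
  | nil => simp [pvSort, pvLast3, PySem.List.sorted]
  | append_singleton l x ih =>
    rw [List.foldl_append, List.foldl_cons, List.foldl_nil,
      pvSort_append_singleton]
    set h := l.foldl pvStep [] with hh
    set s := pvSort l with hs
    have hlen : h.length = (pvLast3 s).length := ih.length_eq
    have hlast : (pvLast3 s).length = s.length - (s.length - 3) := by simp [pvLast3]
    by_cases hn : s.length < 3
    · -- small heap: plain append
      have hcond : ¬ h.length = 3 := by omega
      rw [pvStep, if_neg (by simpa using hcond)]
      have hdrop : pvLast3 s = s := by unfold pvLast3; rw [Nat.sub_eq_zero_of_le (by omega), List.drop_zero]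
      have : pvLast3 (List.orderedInsert (· ≤ ·) x s) = List.orderedInsert (· ≤ ·) x s := by
        unfold pvLast3
        rw [List.orderedInsert_length, Nat.sub_eq_zero_of_le (by omega), List.drop_zero]
      rw [this]
      exact (List.perm_append_singleton x h).trans
        (((hdrop ▸ ih).cons x).trans (List.perm_orderedInsert _ x s).symm)
    · -- full heap: pushpop
      rw [Nat.not_lt] at hn
      have hcond : h.length = 3 := by omega
      rw [pvStep, if_pos (by simpa using hcond)]
      -- decompose the sorted list
      obtain ⟨a, b, c, habc⟩ : ∃ a b c, pvLast3 s = [a, b, c] := by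
        have : (pvLast3 s).length = 3 := by omega
        match hm : pvLast3 s, this with
        | [a, b, c], _ => exact ⟨a, b, c, rfl⟩
      have hsplit : s.take (s.length - 3) ++ [a, b, c] = s := by
        rw [← habc]; exact List.take_append_drop _ s
      have hpw : s.Pairwise (· ≤ ·) := pvSort_pairwise l
      have habcpw : ([a, b, c] : List Int).Pairwise (· ≤ ·) := by
        rw [← habc]; exact hpw.sublist (List.drop_sublist _ s)
      have hab : a ≤ b := (List.pairwise_cons.mp habcpw).1 b (by simp)
      have hac : a ≤ c := (List.pairwise_cons.mp habcpw).1 c (by simp)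
      have hu : ∀ y ∈ s.take (s.length - 3), y ≤ a := by
        intro y hy
        have := (List.pairwise_append.mp (hsplit ▸ hpw)).2.2 y hy a (by simp)
        exact this
      have hperm3 : h.Perm [a, b, c] := habc ▸ ih
      have hpp := pvPushpop_perm h x a b c hab hac hperm3
      have hulen : (s.take (s.length - 3)).length = s.length - 3 := by
        rw [List.length_take]; omega
      have hlen3 : s.length - 2 = (s.take (s.length - 3)).length + 1 := by omega
      by_cases hxa : x ≤ a
      · obtain ⟨w, hw, hwlen⟩ := pvIns_split x a hxa (s.take (s.length - 3)) [b, c]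
        have hins : List.orderedInsert (· ≤ ·) x s = w ++ [a, b, c] := by
          conv_lhs => rw [← hsplit]
          simpa using hw
        have hlast' : pvLast3 (List.orderedInsert (· ≤ ·) x s) = [a, b, c] := by
          unfold pvLast3
          rw [List.orderedInsert_length, hins]
          have hwl : s.length + 1 - 3 = w.length := by omega
          rw [hwl, List.drop_left]
        rw [hlast']
        simpa [hxa] using hpp
      · have hins : List.orderedInsert (· ≤ ·) x s
            = (s.take (s.length - 3) ++ [a]) ++ List.orderedInsert (· ≤ ·) x [b, c] := by
          conv_lhs => rw [← hsplit]
          rw [← pvIns_skip x (s.take (s.length - 3) ++ [a]) [b, c] ?_]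
          · simp
          · intro y hy hxy
            rcases List.mem_append.mp hy with hy' | hy'
            · exact hxa (hxy.trans (hu y hy'))
            · simp at hy'; subst hy'; exact hxa hxy
        have hlast' : pvLast3 (List.orderedInsert (· ≤ ·) x s)
            = List.orderedInsert (· ≤ ·) x [b, c] := by
          unfold pvLast3
          rw [List.orderedInsert_length, hins]
          have hwl : s.length + 1 - 3 = (s.take (s.length - 3) ++ [a]).length := by
            simp [hulen]; omega
          rw [hwl, List.drop_left]
        rw [hlast']
        refine ((by simpa [hxa] using hpp : (pvPushpop h x).Perm [b, c, x])).trans ?_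
        exact (List.perm_append_singleton x [b, c]).trans (List.perm_orderedInsert _ x [b, c]).symm

-- sorting the negated list is the reversed negated sort
theorem pvSort_map_neg (l : List Int) :
    pvSort (l.map (fun y => -y)) = ((pvSort l).map (fun y => -y)).reverse := by
  apply PySem.List.sorted_id_eq_of_perm_of_pairwise
  · exact (List.reverse_perm _).trans ((PySem.List.sorted_perm l _ _).map _)
  · rw [List.pairwise_reverse]
    refine (pvSort_pairwise l).map _ ?_
    intro a b hab
    simpa using hab

-- the final min-heap contents, sorted, are the last-3 slice of the full sort
theorem pvMinH (nums : List Int) :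
    PySem.List.sorted (nums.foldl pvStep []) (fun y => y) false = pvLast3 (pvSort nums) := by
  apply PySem.List.sorted_id_eq_of_perm_of_pairwise
  · exact (pvHeapInv nums).symm
  · exact (pvSort_pairwise nums).sublist (List.drop_sublist _ _)

-- the final (negated) max-heap contents, sorted, are the first-3 slice of the full sort
theorem pvMaxH (nums : List Int) :
    PySem.List.sorted (((nums.map (fun y => -y)).foldl pvStep []).map (fun y => -y)) (fun y => y) false
      = (pvSort nums).take 3 := by
  apply PySem.List.sorted_id_eq_of_perm_of_pairwise
  · have h1 : ((nums.map (fun y => -y)).foldl pvStep []).Perm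
        (pvLast3 (pvSort (nums.map (fun y => -y)))) := pvHeapInv _
    have h2 : pvLast3 (pvSort (nums.map (fun y => -y)))
        = (((pvSort nums).map (fun y => -y)).take ((pvSort nums).length - ((pvSort nums).length - 3))).reverse := by
      rw [pvSort_map_neg]
      unfold pvLast3
      rw [List.length_reverse, List.length_map, List.drop_reverse, List.length_map]
    have htake : (pvSort nums).take ((pvSort nums).length - ((pvSort nums).length - 3)) = (pvSort nums).take 3 := by
      by_cases hle : 3 ≤ (pvSort nums).length
      · congr 1; omega
      · have h0 : (pvSort nums).length - ((pvSort nums).length - 3) = (pvSort nums).length := by omega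
        rw [h0, List.take_length, List.take_of_length_le (by omega)]

    have h3 : ((((pvSort nums).map (fun y => -y)).take ((pvSort nums).length - ((pvSort nums).length - 3))).reverse).map (fun y => -y)
        = ((pvSort nums).take 3).reverse := by
      rw [List.map_reverse]
      congr 1
      rw [← List.map_take, List.map_map, htake]
      simp
    refine (List.reverse_perm _).symm.trans ?_
    rw [← h3, ← h2]
    exact (h1.map _).symm
  · exact (pvSort_pairwise nums).sublist (List.take_sublist _ _)

theorem pvMain (nums : List Int) : minimizeSum2 nums = minimizeSum2_alt nums := by
  have htop : PySem.List.slice (PySem.List.sorted nums (fun y => y) false) (some (-3)) none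
      = pvLast3 (pvSort nums) := by
    rw [PySem.List.slice_from_neg_ofNat _ 3 (by omega)]; rfl
  have hbot : PySem.List.slice (PySem.List.sorted nums (fun y => y) false) none (some 3)
      = (pvSort nums).take 3 := by
    rw [PySem.List.slice_to _ (by omega)]; rfl
  simp only [minimizeSum2, minimizeSum2_alt, pvPairFold nums [] [] rfl]
  rw [pvMinH, pvMaxH]
  show _ = minimizeSum2_alt nums
  simp only [minimizeSum2_alt]
  rw [htop, hbot]

-- ===== VERDICT (by name: the statement is the Claim_ definition above) =====
theorem minimizeSum2_spec : Claim_equal_minimizeSum2 := by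
  intro nums _ _
  unfold Spec_minimizeSum2
  exact pvMain nums
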